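-- pv_equiv track=rewrite | github.com/NYU-Molecular-Pathology/LG-PACT | bin/vcf_qc_checker.py | extract_control_info
-- ===== SOURCE A (Python) =====
-- def extract_control_info(sample_id):
--     """Extract control name and type from Sample_ID."""
--     parts = sample_id.split('_')
--
--     for i, part in enumerate(parts):
--         if part in ['NTC', 'NC', 'SC']:
--             control_name = '_'.join(parts[i:])
--             control_type = part
--             return control_name, control_type
--
--     return None, None
-- ===== SOURCE B (Python) =====
-- def extract_control_info(sample_id):
--     """Extract control name and type from Sample_ID.
--
--     Peels underscore-separated parts off the front with str.find and slicing,
--     instead of materialising a split list and re-joining it.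
--     """
--     s = sample_id
--     while True:
--         j = s.find('_')
--         head = s if j == -1 else s[:j]
--         if head in ('NTC', 'NC', 'SC'):
--             return s, head
--         if j == -1:
--             return None, None
--         s = s[j + 1:]
-- ===== Notes on version B (the rewrite author's own statement) =====
-- stated objective: alternative
-- what changed: Replaces split-into-list + enumerate + re-join with a while loop that repeatedly finds the first underscore and slices: the head part is compared, and on a hit the current suffix itself is the control name, so no list is built and no join is performed.
import Mathlib
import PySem

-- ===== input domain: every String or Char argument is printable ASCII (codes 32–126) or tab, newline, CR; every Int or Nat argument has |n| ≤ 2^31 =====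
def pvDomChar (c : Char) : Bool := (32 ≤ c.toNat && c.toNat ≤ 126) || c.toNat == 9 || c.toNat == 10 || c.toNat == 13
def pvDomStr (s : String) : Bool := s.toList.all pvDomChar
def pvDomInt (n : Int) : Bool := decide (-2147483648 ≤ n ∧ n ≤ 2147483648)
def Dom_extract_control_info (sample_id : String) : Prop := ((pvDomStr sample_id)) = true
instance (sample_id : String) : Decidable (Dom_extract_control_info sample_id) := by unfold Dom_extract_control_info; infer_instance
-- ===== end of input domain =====

-- B replaces split-list + enumerate + join by a find/slice loop that peels parts off the front (alternative decomposition, same cost).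

-- ===== PORT A =====
-- for (i, part) in enumerate(parts): the body only uses part and the suffix parts[i:], so the loop is the structural recursion on the suffix
def eciScanA (parts : List (List Char)) : Option (List Char) × Option (List Char) :=
  match parts with
  | [] => (none, none)
  | p :: rest =>
    if p ∈ [String.toList "NTC", String.toList "NC", String.toList "SC"] then
      (some (PySem.Chars.join ['_'] (p :: rest)), some p)
    else eciScanA rest

def extract_control_info (sample_id : String) : Option String × Option String :=
  let r := eciScanA (PySem.Chars.splitOn sample_id.toList ['_'])
  (r.1.map String.ofList, r.2.map String.ofList)

-- ===== PORT B =====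
-- the 'while True' loop of Source B: j = s.find('_'); head = s if j == -1 else s[:j]; test head; recurse on s[j+1:]
def eciLoopB (s : List Char) : Option (List Char) × Option (List Char) :=
  let j := PySem.Chars.find s ['_']
  let head := if j = -1 then s else PySem.Chars.slice s none (some j)
  if head ∈ [String.toList "NTC", String.toList "NC", String.toList "SC"] then
    (some s, some head)
  else if hj : j = -1 then (none, none)
  else eciLoopB (PySem.Chars.slice s (some (j + 1)) none)
termination_by s.length
decreasing_by
  have h0 : 0 ≤ PySem.Chars.find s ['_'] := by
    rcases (Int.lt_iff_add_one_le.mpr (lt_of_le_of_ne (PySem.Chars.neg_one_le_find s ['_']) (Ne.symm hj))) with h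
    omega
  have hlt : (PySem.Chars.find s ['_']).toNat < s.length := by
    have hinf : ['_'] <+: s.drop (PySem.Chars.find s ['_']).toNat := (PySem.Chars.find_spec h0).1
    have := hinf.length_le
    simp at this
    have hle := PySem.Chars.find_le_length s ['_']
    omega
  rw [PySem.Chars.slice_eq_listSlice, PySem.List.slice_from _ (by omega)]
  simp
  omega

def extract_control_info_alt (sample_id : String) : Option String × Option String :=
  let r := eciLoopB sample_id.toList
  (r.1.map String.ofList, r.2.map String.ofList)

-- ===== PRECONDITION & SPEC =====
def Spec_extract_control_info (sample_id : String) (out : Option String × Option String) : Prop := out = extract_control_info_alt sample_id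
instance (sample_id : String) (out : Option String × Option String) : Decidable (Spec_extract_control_info sample_id out) := by unfold Spec_extract_control_info; infer_instance

-- ===== CLAIM (what is proved, stated in full; the proofs are below) =====
def Claim_equal_extract_control_info : Prop := ∀ (sample_id : String), Dom_extract_control_info sample_id → Spec_extract_control_info sample_id (extract_control_info sample_id)

-- ===== LEMMAS AND PROOFS =====

theorem splitOn_go_single (c : Char) : ∀ (fuel : Nat) (l cur : List Char) (acc : List (List Char)),
    l.length ≤ fuel →
    PySem.Chars.splitOn.go [c] fuel l cur acc
      = acc.reverse ++ (l.splitOnP (· == c)).modifyHead (cur.reverse ++ ·) := by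
  intro fuel
  induction fuel with
  | zero =>
    intro l cur acc h
    have : l = [] := List.length_eq_zero_iff.mp (Nat.le_zero.mp h)
    subst this
    simp [PySem.Chars.splitOn.go, List.splitOnP_nil]
  | succ f ih =>
    intro l cur acc h
    match l with
    | [] => simp [PySem.Chars.splitOn.go, List.splitOnP_nil]
    | d :: rest =>
      rw [PySem.Chars.splitOn.go]
      by_cases hd : d = c
      · subst hd
        have hpre : List.isPrefixOf [d] (d :: rest) = true := by simp [List.isPrefixOf]
        rw [if_pos hpre]
        rw [ih _ _ _ (by simpa using Nat.le_of_succ_le_succ h)]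
        rw [List.splitOnP_cons]
        simp only [beq_self_eq_true]
        obtain ⟨x, xs, hx⟩ := List.exists_cons_of_ne_nil (List.splitOnP_ne_nil (· == d) rest)
        simp [hx]
      · have hpre : List.isPrefixOf [c] (d :: rest) = false := by
          simp [List.isPrefixOf]; intro hdc; exact absurd hdc.symm hd
        rw [if_neg (by simp [hpre])]
        rw [ih _ _ _ (by simpa using Nat.le_of_succ_le_succ h)]
        rw [List.splitOnP_cons]
        have hbe : (d == c) = false := by simp [hd]
        rw [hbe]
        obtain ⟨x, xs, hx⟩ := List.exists_cons_of_ne_nil (List.splitOnP_ne_nil (· == c) rest)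
        rw [hx]
        simp

theorem chars_splitOn_single (c : Char) (l : List Char) :
    PySem.Chars.splitOn l [c] = l.splitOn c := by
  rw [PySem.Chars.splitOn, splitOn_go_single c _ _ _ _ (by omega)]
  obtain ⟨x, xs, hx⟩ := List.exists_cons_of_ne_nil (List.splitOnP_ne_nil (· == c) l)
  simp [List.splitOn, hx]

theorem scanA_eq_loopB_aux : ∀ (n : Nat) (s : List Char), s.length ≤ n →
    eciScanA (s.splitOn '_') = eciLoopB s := by
  intro n
  induction n with
  | zero =>
    intro s h
    have : s = [] := List.length_eq_zero_iff.mp (Nat.le_zero.mp h)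
    subst this
    rw [eciLoopB.eq_def]
    simp [List.splitOn_nil, eciScanA, PySem.Chars.find, PySem.Chars.find.go]
  | succ f ih =>
    intro s h
    rw [eciLoopB.eq_def]
    by_cases hj : PySem.Chars.find s ['_'] = -1
    · have hni : ¬ ['_'] <:+: s := (PySem.Chars.find_eq_neg_one_iff s ['_']).mp hj
      have hnm : ∀ x ∈ s, ¬ (x == '_') = true := by
        intro x hx hb
        apply hni
        obtain ⟨l₁, l₂, rfl⟩ := List.append_of_mem hx
        have : x = '_' := by simpa using hb
        subst this
        exact ⟨l₁, l₂, by simp⟩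
      have hsplit : s.splitOn '_' = [s] := by
        rw [List.splitOn]
        exact List.splitOnP_eq_single _ _ hnm
      rw [hsplit]
      simp only [eciScanA, hj]
      by_cases hk : s ∈ [String.toList "NTC", String.toList "NC", String.toList "SC"]
      · simp [PySem.Chars.join, List.intercalate]
      · simp
    · have h0 : 0 ≤ PySem.Chars.find s ['_'] := by
        have := PySem.Chars.neg_one_le_find s ['_']
        omega
      set j := PySem.Chars.find s ['_'] with hjdef
      set m := j.toNat with hmdef
      have hpre : ['_'] <+: s.drop m := (PySem.Chars.find_spec h0).1
      have hlt : m < s.length := by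
        have := hpre.length_le
        simp at this
        have hle := PySem.Chars.find_le_length s ['_']
        omega
      have hdrop : s.drop m = '_' :: s.drop (m + 1) := by
        obtain ⟨t, ht⟩ := hpre
        have h1 : s.drop m = '_' :: t := by simpa using ht.symm
        have h2 : (s.drop m).drop 1 = s.drop (m+1) := by
          rw [List.drop_drop]
          try rw [Nat.add_comm]
        rw [← h2, h1]
        simp
      have hs : s = s.take m ++ '_' :: s.drop (m + 1) := by
        conv_lhs => rw [← List.take_append_drop m s]
        rw [hdrop]
      have htake : ∀ x ∈ s.take m, ¬ (x == '_') = true := by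
        intro x hx hb
        have hx' : x = '_' := by simpa using hb
        subst hx'
        obtain ⟨i, hi, hgi⟩ := List.getElem_of_mem hx
        have hilt : i < m := by
          have := hi
          simp [List.length_take] at this
          omega
        apply (PySem.Chars.find_spec h0).2 i (by omega)
        refine ⟨(s.take m).drop (i+1) ++ '_' :: s.drop (m+1), ?_⟩
        have : s.drop i = '_' :: ((s.take m).drop (i+1) ++ '_' :: s.drop (m+1)) := by
          conv_lhs => rw [hs]
          rw [List.drop_append_of_le_length (by simp; omega)]
          rw [List.drop_eq_getElem_cons (by simp; omega)]
          simp [hgi]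
        simp [this]
      have hsplit : s.splitOn '_' = s.take m :: (s.drop (m+1)).splitOn '_' := by
        conv_lhs => rw [hs]
        rw [List.splitOn]
        exact List.splitOnP_first _ _ htake '_' (by simp) _
      have hslice_head : PySem.Chars.slice s none (some j) = s.take m := by
        rw [PySem.Chars.slice_eq_listSlice, show j = ((m : Nat) : Int) by omega,
          PySem.List.slice_to_natCast]
      have hslice_tail : PySem.Chars.slice s (some (j + 1)) none = s.drop (m + 1) := by
        rw [PySem.Chars.slice_eq_listSlice, show j + 1 = ((m + 1 : Nat) : Int) by omega,
          PySem.List.slice_from_natCast]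
      have hjoin : PySem.Chars.join ['_'] (s.take m :: (s.drop (m+1)).splitOn '_') = s := by
        rw [← hsplit, PySem.Chars.join, List.splitOn]
        exact List.intercalate_splitOn _ '_'
      rw [hsplit]
      simp only [eciScanA, hslice_head, hslice_tail, hj, if_false, hjoin]
      split_ifs with hc h2
      · rfl
      · exact h2.elim
      · exact ih (s.drop (m+1)) (by simp; omega)

theorem scanA_eq_loopB (s : List Char) : eciScanA (s.splitOn '_') = eciLoopB s :=
  scanA_eq_loopB_aux s.length s le_rfl

-- ===== VERDICT (by name: the statement is the Claim_ definition above) =====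
theorem extract_control_info_spec : Claim_equal_extract_control_info := by
  intro s _
  unfold Spec_extract_control_info extract_control_info extract_control_info_alt
  rw [chars_splitOn_single, scanA_eq_loopB]
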